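-- pv_equiv track=rewrite | github.com/bleonheart/Lilia | fix_section_spacing.py | fix_section_spacing
-- ===== SOURCE A (Python) =====
-- def fix_section_spacing(content):
--     """
--     Fix documentation section spacing by removing blank lines after section headers.
--
--     Args:
--         content: The file content as a string
--
--     Returns:
--         Modified content with proper section spacing
--     """
--     lines = content.split('\n')
--     modified_lines = []
--     in_doc_block = False
--
--     # Major section headers that should not have blank lines after them
--     section_headers = [
--         'Title:',
--         'Purpose:',
--         'When Called:',
--         'Parameters:',
--         'Returns:',
--         'Realm:',
--         'Example Usage:',
--         'Low Complexity:',
--         'Medium Complexity:',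
--         'High Complexity:'
--     ]
--
--     i = 0
--     while i < len(lines):
--         line = lines[i]
--
--         # Check if we're entering a documentation block
--         if line.strip().startswith('--[['):
--             in_doc_block = True
--             modified_lines.append(line)
--             i += 1
--             continue
--
--         # Check if we're exiting a documentation block
--         if in_doc_block and line.strip().startswith(']]'):
--             in_doc_block = False
--             modified_lines.append(line)
--             i += 1
--             continue
--
--         if in_doc_block:
--             # Check if this line contains a major section header
--             is_section_header = False
--             for header in section_headers:
--                 if header in line and not line.strip().startswith('    ') and not line.strip().startswith('\t'):
--                     is_section_header = True
--                     break
--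
--             if is_section_header:
--                 modified_lines.append(line)
--                 i += 1
--
--                 # Skip any blank lines immediately after the section header
--                 while i < len(lines) and lines[i].strip() == '':
--                     i += 1
--                 continue
--
--             modified_lines.append(line)
--         else:
--             modified_lines.append(line)
--
--         i += 1
--
--     return '\n'.join(modified_lines)
-- ===== SOURCE B (Python) =====
-- def fix_section_spacing(content):
--     """Fix documentation section spacing by removing blank lines after section headers."""
--     section_headers = [
--         'Title:', 'Purpose:', 'When Called:', 'Parameters:', 'Returns:',
--         'Realm:', 'Example Usage:', 'Low Complexity:', 'Medium Complexity:',
--         'High Complexity:'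
--     ]
--     out = []
--     in_doc_block = False
--     skip_blanks = False
--     for line in content.split('\n'):
--         stripped = line.strip()
--         if skip_blanks:
--             if stripped == '':
--                 continue
--             skip_blanks = False
--         if stripped.startswith('--[['):
--             in_doc_block = True
--         elif in_doc_block and stripped.startswith(']]'):
--             in_doc_block = False
--         elif in_doc_block and any(h in line for h in section_headers):
--             # a stripped line never starts with spaces/tab, so A's extra
--             # startswith checks are vacuous and dropped here
--             skip_blanks = True
--         out.append(line)
--     return '\n'.join(out)
-- ===== Notes on version B (the rewrite author's own statement) =====
-- stated objective: simpler
-- what changed: Replaced the manual-index while-loop with a nested blank-skipping while by a single for-loop over the lines carrying a skip_blanks flag, and dropped A's vacuous not-startswith checks on the stripped line (a stripped line cannot start with spaces or a tab).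
import Mathlib
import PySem

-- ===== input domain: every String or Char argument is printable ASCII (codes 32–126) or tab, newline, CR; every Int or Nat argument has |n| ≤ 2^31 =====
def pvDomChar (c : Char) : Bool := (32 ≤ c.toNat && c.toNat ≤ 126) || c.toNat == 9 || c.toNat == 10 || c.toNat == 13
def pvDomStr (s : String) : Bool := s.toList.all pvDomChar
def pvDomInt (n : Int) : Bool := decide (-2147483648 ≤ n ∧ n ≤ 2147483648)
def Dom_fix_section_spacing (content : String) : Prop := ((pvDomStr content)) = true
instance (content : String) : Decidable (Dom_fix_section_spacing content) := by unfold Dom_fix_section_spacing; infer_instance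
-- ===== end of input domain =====

-- B replaces A's index-walking while-loop (with its inner blank-skipping while) by a single
-- pass carrying a skip_blanks flag, and drops A's vacuous not-startswith checks; same output.

-- ===== PORT A =====
def sectionHeaders : List String :=
  ["Title:", "Purpose:", "When Called:", "Parameters:", "Returns:",
   "Realm:", "Example Usage:", "Low Complexity:", "Medium Complexity:", "High Complexity:"]

-- A's inner 'while i < len(lines) and lines[i].strip() == "": i += 1'
def skipBlanksA : List String → List String
  | [] => []
  | l :: rest => if PySem.Str.strip l = "" then skipBlanksA rest else l :: rest

-- termination measure for loopA (cited by its decreasing_by)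
theorem skipBlanksA_length_le : ∀ ls : List String, (skipBlanksA ls).length ≤ ls.length := by
  intro ls
  induction ls with
  | nil => simp [skipBlanksA]
  | cons l rest ih =>
    by_cases h : PySem.Str.strip l = ""
    · simp [skipBlanksA, h]; omega
    · simp [skipBlanksA, h]

-- A's while-loop over the line index, as structural recursion on the remaining lines
def loopA : List String → Bool → List String
  | [], _ => []
  | line :: rest, in_doc =>
    if PySem.Str.startswith (PySem.Str.strip line) "--[[" then
      line :: loopA rest true
    else if in_doc && PySem.Str.startswith (PySem.Str.strip line) "]]" then
      line :: loopA rest false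
    else if in_doc then
      if sectionHeaders.any (fun h =>
           PySem.Str.isIn h line
           && !(PySem.Str.startswith (PySem.Str.strip line) "    ")
           && !(PySem.Str.startswith (PySem.Str.strip line) "\t")) then
        line :: loopA (skipBlanksA rest) in_doc
      else
        line :: loopA rest in_doc
    else
      line :: loopA rest in_doc
  termination_by ls _ => ls.length
  decreasing_by
  all_goals (have := skipBlanksA_length_le rest; try simp; try omega)

def fix_section_spacing (content : String) : String :=
  PySem.Str.join "\n" (loopA ((PySem.Chars.splitOn content.toList ['\n']).map String.ofList) false)

-- ===== PORT B =====
-- B's single for-loop with the skip_blanks flag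
def loopB : List String → Bool → Bool → List String
  | [], _, _ => []
  | line :: rest, in_doc, skip =>
    if skip && PySem.Str.strip line = "" then
      loopB rest in_doc skip
    else if PySem.Str.startswith (PySem.Str.strip line) "--[[" then
      line :: loopB rest true false
    else if in_doc && PySem.Str.startswith (PySem.Str.strip line) "]]" then
      line :: loopB rest false false
    else if in_doc && sectionHeaders.any (fun h => PySem.Str.isIn h line) then
      line :: loopB rest in_doc true
    else
      line :: loopB rest in_doc false

def fix_section_spacing_alt (content : String) : String :=
  PySem.Str.join "\n" (loopB ((PySem.Chars.splitOn content.toList ['\n']).map String.ofList) false false)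

-- ===== PRECONDITION & SPEC =====
def Spec_fix_section_spacing (content : String) (out : String) : Prop := out = fix_section_spacing_alt content
instance (content : String) (out : String) : Decidable (Spec_fix_section_spacing content out) := by unfold Spec_fix_section_spacing; infer_instance

-- ===== CLAIM (what is proved, stated in full; the proofs are below) =====
def Claim_equal_fix_section_spacing : Prop := ∀ (content : String), Dom_fix_section_spacing content → Spec_fix_section_spacing content (fix_section_spacing content)

-- ===== LEMMAS AND PROOFS =====

theorem lstrip_head (s : List Char) : ∀ c t, PySem.Chars.lstrip s = c :: t → PySem.Chars.isspace c = false := by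
  induction s with
  | nil => intro c t h; simp [PySem.Chars.lstrip] at h
  | cons x xs ih =>
    intro c t h
    by_cases hx : PySem.Chars.isspace x = true
    · exact ih c t (by simpa [PySem.Chars.lstrip, List.dropWhile_cons, hx] using h)
    · simp [PySem.Chars.lstrip, hx] at h
      obtain ⟨hc, -⟩ := h
      simpa [hc] using hx

theorem rstrip_prefix (l : List Char) : PySem.Chars.rstrip l <+: l := by
  have h : List.dropWhile PySem.Chars.isspace l.reverse <:+ l.reverse := List.dropWhile_suffix _
  have h2 : (List.dropWhile PySem.Chars.isspace l.reverse).reverse <+: l.reverse.reverse :=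
    List.reverse_prefix.mpr (by simpa using h)
  simpa [PySem.Chars.rstrip] using h2

theorem strip_cons_not_space {s : List Char} {c : Char} {t : List Char}
    (h : PySem.Chars.strip s = c :: t) : PySem.Chars.isspace c = false := by
  have hp : c :: t <+: PySem.Chars.lstrip s := by
    rw [PySem.Chars.strip] at h; rw [← h]; exact rstrip_prefix _
  obtain ⟨u, hu⟩ := hp
  exact lstrip_head s c (t ++ u) (by simpa using hu.symm)

theorem startswith_strip_ws_false (s : List Char) (c : Char) (rest : List Char)
    (hc : PySem.Chars.isspace c = true) :
    PySem.Chars.startswith (PySem.Chars.strip s) (c :: rest) = false := by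
  cases hcase : PySem.Chars.strip s with
  | nil => simp [PySem.Chars.startswith, List.isPrefixOf]
  | cons d u =>
    have hd : PySem.Chars.isspace d = false := strip_cons_not_space hcase
    have hne : (c == d) = false := by
      cases hbe : c == d
      · rfl
      · exfalso; have : c = d := by simpa using hbe
        rw [this] at hc; simp [hc] at hd
    simp [PySem.Chars.startswith, List.isPrefixOf, hne]

theorem headerA_iff (line : String) :
    (∃ x ∈ sectionHeaders,
        (PySem.Chars.isIn x.toList line.toList = true ∧
          PySem.Chars.startswith (PySem.Chars.strip line.toList) [' ', ' ', ' ', ' '] = false) ∧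
        PySem.Chars.startswith (PySem.Chars.strip line.toList) ['\t'] = false)
    ↔ (∃ x ∈ sectionHeaders, PySem.Chars.isIn x.toList line.toList = true) := by
  have h4 : PySem.Chars.startswith (PySem.Chars.strip line.toList) [' ', ' ', ' ', ' '] = false :=
    startswith_strip_ws_false _ _ _ (by decide)
  have ht : PySem.Chars.startswith (PySem.Chars.strip line.toList) ['\t'] = false :=
    startswith_strip_ws_false _ _ _ (by decide)
  simp [h4, ht]

theorem loop_eq : ∀ (n : Nat) (ls : List String) (d : Bool), ls.length ≤ n →
    loopA ls d = loopB ls d false ∧ loopB ls d true = loopA (skipBlanksA ls) d := by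
  intro n
  induction n with
  | zero =>
    intro ls d h
    have : ls = [] := List.eq_nil_of_length_eq_zero (Nat.le_zero.mp h)
    subst this
    exact ⟨by simp [loopA, loopB], by simp [loopA, loopB, skipBlanksA]⟩
  | succ n ih =>
    intro ls d h
    cases ls with
    | nil => exact ⟨by simp [loopA, loopB], by simp [loopA, loopB, skipBlanksA]⟩
    | cons line rest =>
      have hlen : rest.length ≤ n := by simpa using h
      have hskiplen : (skipBlanksA rest).length ≤ n :=
        le_trans (skipBlanksA_length_le rest) hlen
      have h1 : loopA (line :: rest) d = loopB (line :: rest) d false := by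
        by_cases hopen :
            PySem.Chars.startswith (PySem.Chars.strip line.toList) ['-', '-', '[', '['] = true
        · simp [loopA, loopB, hopen, (ih rest true hlen).1]
        · cases hd : d with
          | false =>
            simp [loopA, loopB, hopen, (ih rest false hlen).1]
          | true =>
            by_cases hclose :
                PySem.Chars.startswith (PySem.Chars.strip line.toList) [']', ']'] = true
            · simp [loopA, loopB, hopen, hclose, (ih rest false hlen).1]
            · by_cases hhdr : ∃ x ∈ sectionHeaders, PySem.Chars.isIn x.toList line.toList = true
              · simp [loopA, loopB, hopen, hclose, headerA_iff, hhdr,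
                      (ih (skipBlanksA rest) true hskiplen).1, (ih rest true hlen).2]
              · simp [loopA, loopB, hopen, hclose, headerA_iff, hhdr, (ih rest true hlen).1]
      refine ⟨h1, ?_⟩
      by_cases hblank : PySem.Str.strip line = ""
      · have hsb : skipBlanksA (line :: rest) = skipBlanksA rest := by
          simp [skipBlanksA, hblank]
        rw [hsb]
        have hB : loopB (line :: rest) d true = loopB rest d true := by
          simp [loopB, hblank]
        rw [hB, (ih rest d hlen).2]
      · have hsb : skipBlanksA (line :: rest) = line :: rest := by
          simp [skipBlanksA, hblank]
        have h2 : loopB (line :: rest) d true = loopB (line :: rest) d false := by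
          simp [loopB, hblank]
        rw [hsb, h2, ← h1]

-- ===== VERDICT (by name: the statement is the Claim_ definition above) =====
theorem fix_section_spacing_spec : Claim_equal_fix_section_spacing := by
  intro content _
  unfold Spec_fix_section_spacing fix_section_spacing fix_section_spacing_alt
  rw [(loop_eq _ _ false le_rfl).1]
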